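-- pv_equiv track=rewrite | github.com/BugTraceAI/BugTraceAI-CLI | bugtrace/agents/csti/payloads.py | prioritize_csti_params
-- ===== SOURCE A (Python) =====
-- from typing import Dict, List, Tuple
--
-- CSTI_HIGH_PRIORITY_PARAMS: List[str] = [
--     "template", "message", "content", "subject", "body",
--     "text", "comment", "description", "email_body", "sms_body",
-- ]
--
-- CSTI_MEDIUM_PRIORITY_PARAMS: List[str] = [
--     "search", "q", "query", "name", "title",
--     "view", "page", "lang", "theme",
-- ]
--
-- def prioritize_csti_params(all_params: Dict[str, str]) -> List[Dict]:  # PURE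
--     """
--     Prioritize CSTI-related parameter names.
--
--     Args:
--         all_params: Dict mapping param names to default values
--
--     Returns:
--         Ordered list of param dicts: high priority first, then medium, then rest
--     """
--     prioritized = []
--
--     # 1. High priority params first
--     for param_name in CSTI_HIGH_PRIORITY_PARAMS:
--         if param_name in all_params:
--             prioritized.append({"parameter": param_name, "source": "html_form_high_priority"})
--
--     # 2. Medium priority params
--     for param_name in CSTI_MEDIUM_PRIORITY_PARAMS:
--         if param_name in all_params and param_name not in [p["parameter"] for p in prioritized]:
--             prioritized.append({"parameter": param_name, "source": "html_form_medium_priority"})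
--
--     # 3. All other discovered params
--     for param_name in all_params.keys():
--         if param_name not in [p["parameter"] for p in prioritized]:
--             prioritized.append({"parameter": param_name, "source": "html_form_discovered"})
--
--     return prioritized
-- ===== SOURCE B (Python) =====
-- from typing import Dict, List
--
-- CSTI_HIGH_PRIORITY_PARAMS: List[str] = [
--     "template", "message", "content", "subject", "body",
--     "text", "comment", "description", "email_body", "sms_body",
-- ]
--
-- CSTI_MEDIUM_PRIORITY_PARAMS: List[str] = [
--     "search", "q", "query", "name", "title",
--     "view", "page", "lang", "theme",
-- ]
--
-- _HIGH_RANK = {name: i for i, name in enumerate(CSTI_HIGH_PRIORITY_PARAMS)}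
-- _MEDIUM_RANK = {name: i for i, name in enumerate(CSTI_MEDIUM_PRIORITY_PARAMS)}
--
--
-- def prioritize_csti_params(all_params: Dict[str, str]) -> List[Dict]:
--     # One pass over the params: drop each name into its priority slot
--     # (indexed by its rank in the tier list) or onto the rest list.
--     high = [None] * len(CSTI_HIGH_PRIORITY_PARAMS)
--     medium = [None] * len(CSTI_MEDIUM_PRIORITY_PARAMS)
--     rest = []
--     for name in all_params:
--         i = _HIGH_RANK.get(name)
--         if i is not None:
--             high[i] = {"parameter": name, "source": "html_form_high_priority"}
--         else:
--             j = _MEDIUM_RANK.get(name)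
--             if j is not None:
--                 medium[j] = {"parameter": name, "source": "html_form_medium_priority"}
--             else:
--                 rest.append({"parameter": name, "source": "html_form_discovered"})
--     return ([d for d in high if d is not None]
--             + [d for d in medium if d is not None]
--             + rest)
-- ===== Notes on version B (the rewrite author's own statement) =====
-- stated objective: faster
-- what changed: A scans the two priority lists and rebuilds the list of already-taken names inside every loop iteration; B makes a single pass over the params, dropping each name into a slot indexed by its precomputed rank (or onto the rest list) and concatenating the filled slots.
import Mathlib
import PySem

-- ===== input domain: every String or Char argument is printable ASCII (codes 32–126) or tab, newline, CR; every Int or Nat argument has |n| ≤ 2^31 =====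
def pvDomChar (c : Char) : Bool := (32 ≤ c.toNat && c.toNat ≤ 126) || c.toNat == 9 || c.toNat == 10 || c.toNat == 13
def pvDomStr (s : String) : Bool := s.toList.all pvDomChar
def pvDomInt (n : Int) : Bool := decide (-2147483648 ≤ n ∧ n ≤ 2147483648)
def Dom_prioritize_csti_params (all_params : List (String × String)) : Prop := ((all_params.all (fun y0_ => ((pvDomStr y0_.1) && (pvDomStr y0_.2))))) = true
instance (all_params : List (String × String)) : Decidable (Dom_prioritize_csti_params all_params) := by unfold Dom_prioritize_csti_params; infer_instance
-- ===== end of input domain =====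

-- B replaces A's three tier scans (with their quadratic rebuilt name lists) by one pass over
-- the params that drops each name into a rank-indexed slot; return value only (both are pure).

-- ===== PORT A =====
def pvCstiHigh : List String :=
  ["template", "message", "content", "subject", "body",
   "text", "comment", "description", "email_body", "sms_body"]

def pvCstiMedium : List String :=
  ["search", "q", "query", "name", "title",
   "view", "page", "lang", "theme"]

-- {"parameter": name, "source": src} as an insertion-ordered dict
def pvMkEntry (src name : String) : List (String × String) := [("parameter", name), ("source", src)]

-- [p["parameter"] for p in prioritized]; exact: every entry carries the "parameter" key
def pvParamNames (acc : List (List (String × String))) : List String :=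
  acc.map (fun d => PySem.Dict.getD (PySem.Dict.mk d) "parameter" "")

def prioritize_csti_params (all_params : List (String × String)) : List (List (String × String)) :=
  -- iteration over / membership in the dict sees each key once, insertion order
  let keys := PySem.List.dedup (all_params.map Prod.fst)
  let p1 := pvCstiHigh.foldl
    (fun acc p => if p ∈ keys then acc ++ [pvMkEntry "html_form_high_priority" p] else acc) []
  let p2 := pvCstiMedium.foldl
    (fun acc p => if p ∈ keys ∧ p ∉ pvParamNames acc then acc ++ [pvMkEntry "html_form_medium_priority" p] else acc) p1
  keys.foldl
    (fun acc k => if k ∉ pvParamNames acc then acc ++ [pvMkEntry "html_form_discovered" k] else acc) p2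

-- ===== PORT B =====
def pvHighRank : PySem.Dict String Int :=
  PySem.Dict.ofList ((PySem.List.enumerate pvCstiHigh).map (fun p => (p.2, p.1)))

def pvMediumRank : PySem.Dict String Int :=
  PySem.Dict.ofList ((PySem.List.enumerate pvCstiMedium).map (fun p => (p.2, p.1)))

def pvStep
    (s : List (Option (List (String × String))) × List (Option (List (String × String))) × List (List (String × String)))
    (name : String) :
    List (Option (List (String × String))) × List (Option (List (String × String))) × List (List (String × String)) :=
  match pvHighRank.get? name with
  | some i => (s.1.set i.toNat (some (pvMkEntry "html_form_high_priority" name)), s.2.1, s.2.2)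
  | none =>
    match pvMediumRank.get? name with
    | some j => (s.1, s.2.1.set j.toNat (some (pvMkEntry "html_form_medium_priority" name)), s.2.2)
    | none => (s.1, s.2.1, s.2.2 ++ [pvMkEntry "html_form_discovered" name])

def prioritize_csti_params_alt (all_params : List (String × String)) : List (List (String × String)) :=
  let s := (PySem.List.dedup (all_params.map Prod.fst)).foldl pvStep
    (List.replicate pvCstiHigh.length none, List.replicate pvCstiMedium.length none, [])
  s.1.filterMap id ++ s.2.1.filterMap id ++ s.2.2

-- ===== PRECONDITION & SPEC =====
def Spec_prioritize_csti_params (all_params : List (String × String)) (out : List (List (String × String))) : Prop := out = prioritize_csti_params_alt all_params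
instance (all_params : List (String × String)) (out : List (List (String × String))) : Decidable (Spec_prioritize_csti_params all_params out) := by unfold Spec_prioritize_csti_params; infer_instance

-- ===== CLAIM (what is proved, stated in full; the proofs are below) =====
def Claim_equal_prioritize_csti_params : Prop := ∀ (all_params : List (String × String)), Dom_prioritize_csti_params all_params → Spec_prioritize_csti_params all_params (prioritize_csti_params all_params)

-- ===== LEMMAS AND PROOFS =====

-- rank-table facts
theorem pv_hr_some (k : String) (i : Int) (h : pvHighRank.get? k = some i) :
    pvCstiHigh[i.toNat]? = some k := by
  simp [show pvHighRank = PySem.Dict.mk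
      [("template",0),("message",1),("content",2),("subject",3),("body",4),
       ("text",5),("comment",6),("description",7),("email_body",8),("sms_body",9)] from by decide,
    PySem.Dict.get?_mk_cons] at h
  split_ifs at h <;> (try obtain rfl := Option.some.inj h) <;> subst_vars <;>
    first | decide | simp [PySem.Dict.get?] at h

theorem pv_hr_none (k : String) (h : pvHighRank.get? k = none) : k ∉ pvCstiHigh := by
  intro hk; fin_cases hk <;> revert h <;> decide

theorem pv_mr_some (k : String) (i : Int) (h : pvMediumRank.get? k = some i) :
    pvCstiMedium[i.toNat]? = some k := by
  simp [show pvMediumRank = PySem.Dict.mk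
      [("search",0),("q",1),("query",2),("name",3),("title",4),
       ("view",5),("page",6),("lang",7),("theme",8)] from by decide,
    PySem.Dict.get?_mk_cons] at h
  split_ifs at h <;> (try obtain rfl := Option.some.inj h) <;> subst_vars <;>
    first | decide | simp [PySem.Dict.get?] at h

theorem pv_mr_none (k : String) (h : pvMediumRank.get? k = none) : k ∉ pvCstiMedium := by
  intro hk; fin_cases hk <;> revert h <;> decide

theorem pv_disjHM (x : String) (hx : x ∈ pvCstiHigh) : x ∉ pvCstiMedium := by
  fin_cases hx <;> decide

theorem pv_disjMH (x : String) (hx : x ∈ pvCstiMedium) : x ∉ pvCstiHigh := by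
  fin_cases hx <;> decide

-- setting the slot of k in a mapped nodup list
theorem pv_set_map {β : Type} (l : List String) (f : String → β) (i : Nat) (k : String) (v : β)
    (hnd : l.Nodup) (hk : l[i]? = some k) :
    (l.map f).set i v = l.map (fun p => if p = k then v else f p) := by
  induction l generalizing i with
  | nil => simp at hk
  | cons a t ih =>
    rcases List.nodup_cons.mp hnd with ⟨hat, hndt⟩
    cases i with
    | zero =>
      simp only [List.getElem?_cons_zero, Option.some.injEq] at hk
      subst hk
      simp only [List.map_cons, List.set_cons_zero]
      refine congrArg _ ?_
      exact (List.map_congr_left (fun p hp => by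
        have : ¬ p = a := fun h => hat (h ▸ hp)
        simp [this])).symm
    | succ n =>
      simp only [List.getElem?_cons_succ] at hk
      have hkt : k ∈ t := List.mem_of_getElem? hk
      have hak : ¬ a = k := fun h => hat (h ▸ hkt)
      simp only [List.map_cons, List.set_cons_succ, if_neg hak]
      exact congrArg _ (ih _ hndt hk)

theorem pv_filterMap_ite {β : Type} (l : List String) (q : String → Prop) [DecidablePred q] (g : String → β) :
    (l.map (fun p => if q p then some (g p) else none)).filterMap id
      = (l.filter (fun p => decide (q p))).map g := by
  induction l with
  | nil => rfl
  | cons a t ih =>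
    simp only [List.map_cons, List.filterMap_cons, List.filter_cons]
    by_cases h : q a <;> simpa [h, List.filterMap_map] using ih

-- the three result tiers, as functions of the processed key set
def pvFH (P : List String) (p : String) : Option (List (String × String)) :=
  if p ∈ P then some (pvMkEntry "html_form_high_priority" p) else none

def pvFM (P : List String) (p : String) : Option (List (String × String)) :=
  if p ∈ P then some (pvMkEntry "html_form_medium_priority" p) else none

def pvRestOf (ks : List String) : List (List (String × String)) :=
  (ks.filter (fun k => decide (k ∉ pvCstiHigh ∧ k ∉ pvCstiMedium))).map (pvMkEntry "html_form_discovered")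

-- B's loop invariant
theorem pv_B1 (ks P : List String) (r0 : List (List (String × String))) :
    ks.foldl pvStep (pvCstiHigh.map (pvFH P), pvCstiMedium.map (pvFM P), r0)
      = (pvCstiHigh.map (pvFH (P ++ ks)), pvCstiMedium.map (pvFM (P ++ ks)), r0 ++ pvRestOf ks) := by
  induction ks generalizing P r0 with
  | nil => simp [pvRestOf]
  | cons k t ih =>
    simp only [List.foldl_cons]
    have hstep : pvStep (pvCstiHigh.map (pvFH P), pvCstiMedium.map (pvFM P), r0) k
        = (pvCstiHigh.map (pvFH (P ++ [k])), pvCstiMedium.map (pvFM (P ++ [k])), r0 ++ pvRestOf [k]) := by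
      cases hh : pvHighRank.get? k with
      | some i =>
        have hk := pv_hr_some k i hh
        have hkH : k ∈ pvCstiHigh := List.mem_of_getElem? hk
        have hkM : k ∉ pvCstiMedium := pv_disjHM k hkH
        simp only [pvStep, hh]
        refine Prod.ext ?_ (Prod.ext ?_ ?_)
        · rw [pv_set_map _ _ _ _ _ (by decide) hk]
          refine List.map_congr_left (fun p hp => ?_)
          by_cases hpk : p = k
          · subst hpk; simp [pvFH]
          · simp [pvFH, hpk]
        · refine List.map_congr_left (fun p hp => ?_)
          have hpk : ¬ p = k := fun h => hkM (h ▸ hp)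
          simp [pvFM, hpk]
        · simp [pvRestOf, hkH]
      | none =>
        have hkH : k ∉ pvCstiHigh := pv_hr_none k hh
        cases hm : pvMediumRank.get? k with
        | some j =>
          have hk := pv_mr_some k j hm
          have hkM : k ∈ pvCstiMedium := List.mem_of_getElem? hk
          simp only [pvStep, hh, hm]
          refine Prod.ext ?_ (Prod.ext ?_ ?_)
          · refine List.map_congr_left (fun p hp => ?_)
            have hpk : ¬ p = k := fun h => hkH (h ▸ hp)
            simp [pvFH, hpk]
          · rw [pv_set_map _ _ _ _ _ (by decide) hk]
            refine List.map_congr_left (fun p hp => ?_)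
            by_cases hpk : p = k
            · subst hpk; simp [pvFM]
            · simp [pvFM, hpk]
          · simp [pvRestOf, hkM]
        | none =>
          have hkM : k ∉ pvCstiMedium := pv_mr_none k hm
          simp only [pvStep, hh, hm]
          refine Prod.ext ?_ (Prod.ext ?_ ?_)
          · refine List.map_congr_left (fun p hp => ?_)
            have hpk : ¬ p = k := fun h => hkH (h ▸ hp)
            simp [pvFH, hpk]
          · refine List.map_congr_left (fun p hp => ?_)
            have hpk : ¬ p = k := fun h => hkM (h ▸ hp)
            simp [pvFM, hpk]
          · simp [pvRestOf, hkH, hkM]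
    rw [hstep, ih]
    by_cases hk : k ∉ pvCstiHigh ∧ k ∉ pvCstiMedium <;>
      simp [pvRestOf, hk, List.append_assoc]

-- pvParamNames facts
theorem pv_pnames_append (a b : List (List (String × String))) :
    pvParamNames (a ++ b) = pvParamNames a ++ pvParamNames b := by
  simp [pvParamNames]

theorem pv_pnames_single (s n : String) : pvParamNames [pvMkEntry s n] = [n] := by
  simp [pvParamNames, pvMkEntry, PySem.Dict.getD, PySem.Dict.get?]

theorem pv_pnames_map (s : String) (l : List String) :
    pvParamNames (l.map (pvMkEntry s)) = l := by
  induction l with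
  | nil => rfl
  | cons a t ih =>
    simpa [pvParamNames, pvMkEntry, PySem.Dict.getD, PySem.Dict.get?] using ih

-- A's medium loop
theorem pv_A2 (ms keys : List String) (acc : List (List (String × String)))
    (hnd : ms.Nodup) (hdisj : ∀ m ∈ ms, m ∉ pvParamNames acc) :
    ms.foldl (fun acc p => if p ∈ keys ∧ p ∉ pvParamNames acc then acc ++ [pvMkEntry "html_form_medium_priority" p] else acc) acc
      = acc ++ (ms.filter (fun p => decide (p ∈ keys))).map (pvMkEntry "html_form_medium_priority") := by
  induction ms generalizing acc with
  | nil => simp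
  | cons m t ih =>
    rcases List.nodup_cons.mp hnd with ⟨hmt, hndt⟩
    simp only [List.foldl_cons]
    by_cases hk : m ∈ keys
    · rw [if_pos ⟨hk, hdisj m (by simp)⟩]
      rw [ih (acc ++ [pvMkEntry "html_form_medium_priority" m]) hndt ?_]
      · simp [hk, List.append_assoc]
      · intro m' hm'
        rw [pv_pnames_append, pv_pnames_single]
        simp only [List.mem_append, List.mem_singleton]
        rintro (h | h)
        · exact hdisj m' (List.mem_cons_of_mem _ hm') h
        · exact hmt (h ▸ hm')
    · rw [if_neg (fun hc => hk hc.1)]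
      rw [ih acc hndt (fun m' hm' => hdisj m' (List.mem_cons_of_mem _ hm'))]
      simp [hk]

-- A's discovered loop
theorem pv_A3 (ks : List String) (acc : List (List (String × String))) (hnd : ks.Nodup) :
    ks.foldl (fun acc k => if k ∉ pvParamNames acc then acc ++ [pvMkEntry "html_form_discovered" k] else acc) acc
      = acc ++ (ks.filter (fun k => decide (k ∉ pvParamNames acc))).map (pvMkEntry "html_form_discovered") := by
  induction ks generalizing acc with
  | nil => simp
  | cons k t ih =>
    rcases List.nodup_cons.mp hnd with ⟨hkt, hndt⟩
    simp only [List.foldl_cons]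
    by_cases h : k ∈ pvParamNames acc
    · rw [if_neg (not_not_intro h)]
      rw [ih acc hndt]
      simp [h]
    · rw [if_pos h]
      rw [ih _ hndt]
      have hfil : t.filter (fun k' => decide (k' ∉ pvParamNames (acc ++ [pvMkEntry "html_form_discovered" k])))
          = t.filter (fun k' => decide (k' ∉ pvParamNames acc)) := by
        refine List.filter_congr (fun k' hk' => ?_)
        have hkk : ¬ k' = k := fun hh => hkt (hh ▸ hk')
        simp [pv_pnames_append, pv_pnames_single, hkk]
      rw [hfil]
      simp [h, List.append_assoc]

-- assembling both programs into the same normal form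
theorem pv_main (keys : List String) (hnd : keys.Nodup) :
    keys.foldl
      (fun acc k => if k ∉ pvParamNames acc then acc ++ [pvMkEntry "html_form_discovered" k] else acc)
      (pvCstiMedium.foldl
        (fun acc p => if p ∈ keys ∧ p ∉ pvParamNames acc then acc ++ [pvMkEntry "html_form_medium_priority" p] else acc)
        (pvCstiHigh.foldl
          (fun acc p => if p ∈ keys then acc ++ [pvMkEntry "html_form_high_priority" p] else acc) []))
      = (keys.foldl pvStep
          (List.replicate pvCstiHigh.length none, List.replicate pvCstiMedium.length none, [])).1.filterMap id
        ++ (keys.foldl pvStep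
          (List.replicate pvCstiHigh.length none, List.replicate pvCstiMedium.length none, [])).2.1.filterMap id
        ++ (keys.foldl pvStep
          (List.replicate pvCstiHigh.length none, List.replicate pvCstiMedium.length none, [])).2.2 := by
  -- A, high tier
  have hcv : (fun (acc : List (List (String × String))) p => if p ∈ keys then acc ++ [pvMkEntry "html_form_high_priority" p] else acc)
      = (fun acc p => if decide (p ∈ keys) then acc ++ [pvMkEntry "html_form_high_priority" p] else acc) := by
    funext acc p; by_cases hp : p ∈ keys <;> simp [hp]
  rw [hcv, PySem.List.foldl_append_if, List.nil_append]
  -- A, medium tier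
  rw [pv_A2 _ keys _ (by decide) ?_]
  · -- A, discovered tier
    rw [pv_A3 keys _ hnd]
    have hp2 : pvParamNames ((pvCstiHigh.filter (fun p => decide (p ∈ keys))).map (pvMkEntry "html_form_high_priority")
          ++ (pvCstiMedium.filter (fun p => decide (p ∈ keys))).map (pvMkEntry "html_form_medium_priority"))
        = pvCstiHigh.filter (fun p => decide (p ∈ keys)) ++ pvCstiMedium.filter (fun p => decide (p ∈ keys)) := by
      rw [pv_pnames_append, pv_pnames_map, pv_pnames_map]
    have hfil : keys.filter (fun k => decide (k ∉ pvParamNames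
          ((pvCstiHigh.filter (fun p => decide (p ∈ keys))).map (pvMkEntry "html_form_high_priority")
            ++ (pvCstiMedium.filter (fun p => decide (p ∈ keys))).map (pvMkEntry "html_form_medium_priority"))))
        = keys.filter (fun k => decide (k ∉ pvCstiHigh ∧ k ∉ pvCstiMedium)) := by
      refine List.filter_congr (fun k hkmem => ?_)
      rw [hp2]
      refine decide_eq_decide.mpr ?_
      simp only [List.mem_append, List.mem_filter, decide_eq_true_eq]
      constructor
      · intro hno
        exact ⟨fun hH => hno (Or.inl ⟨hH, hkmem⟩), fun hM => hno (Or.inr ⟨hM, hkmem⟩)⟩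
      · rintro ⟨hH, hM⟩ (⟨hh, _⟩ | ⟨hm, _⟩)
        · exact hH hh
        · exact hM hm
    rw [hfil]
    -- B
    have hinit : (List.replicate pvCstiHigh.length (none : Option (List (String × String))),
          List.replicate pvCstiMedium.length (none : Option (List (String × String))),
          ([] : List (List (String × String))))
        = (pvCstiHigh.map (pvFH []), pvCstiMedium.map (pvFM []), ([] : List (List (String × String)))) := by
      decide
    rw [hinit, pv_B1 keys [] [], List.nil_append, List.nil_append]
    have hFH : pvCstiHigh.map (pvFH keys)
        = pvCstiHigh.map (fun p => if p ∈ keys then some (pvMkEntry "html_form_high_priority" p) else none) := rfl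
    have hFM : pvCstiMedium.map (pvFM keys)
        = pvCstiMedium.map (fun p => if p ∈ keys then some (pvMkEntry "html_form_medium_priority" p) else none) := rfl
    rw [hFH, hFM, pv_filterMap_ite, pv_filterMap_ite]
    simp [pvRestOf, List.append_assoc]
  · -- medium names are absent from the high-tier result
    intro m hm
    rw [pv_pnames_map]
    intro hmem
    exact pv_disjMH m hm (List.mem_filter.mp hmem).1

-- ===== VERDICT (by name: the statement is the Claim_ definition above) =====
theorem prioritize_csti_params_spec : Claim_equal_prioritize_csti_params := by
  intro all_params _
  exact pv_main (PySem.List.dedup (all_params.map Prod.fst)) (PySem.List.nodup_dedup _)
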